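-- pv_equiv track=rewrite | github.com/ah91648/roomie-roster | backend/scripts/check_handler_parity.py | _assess_impact
-- ===== SOURCE A (Python) =====
-- def _assess_impact(missing):
--     """Assess the impact of missing methods."""
--     impact_map = {
--         'Requests System': ['request'],
--         'Laundry Scheduling': ['laundry'],
--         'Blocked Time Slots': ['blocked'],
--         'Shopping List': ['shopping'],
--         'Sub-Chores': ['sub_chore'],
--     }
--
--     impacts = []
--     for feature, keywords in impact_map.items():
--         affected = [m for m in missing if any(kw in m.lower() for kw in keywords)]
--         if affected:
--             impacts.append(f"  ❌ {feature}: {len(affected)} methods missing - FEATURE BROKEN")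
--
--     return "\n".join(impacts) if impacts else "  ℹ️ No critical features affected"
-- ===== SOURCE B (Python) =====
-- def _assess_impact(missing):
--     """Assess the impact of missing methods (single counting pass, then a formatting pass)."""
--     features = [
--         ('Requests System', 'request'),
--         ('Laundry Scheduling', 'laundry'),
--         ('Blocked Time Slots', 'blocked'),
--         ('Shopping List', 'shopping'),
--         ('Sub-Chores', 'sub_chore'),
--     ]
--     counts = [[name, kw, 0] for name, kw in features]
--     for m in missing:
--         ml = m.lower()
--         for row in counts:
--             if row[1] in ml:
--                 row[2] += 1
--     lines = [f"  ❌ {name}: {c} methods missing - FEATURE BROKEN"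
--              for name, _, c in counts if c]
--     return "\n".join(lines) if lines else "  ℹ️ No critical features affected"
-- ===== Notes on version B (the rewrite author's own statement) =====
-- stated objective: faster
-- what changed: A scans the whole `missing` list once per feature building a filtered list each time; B makes a single counting pass over `missing` incrementing a per-feature counter row, then a second pass over the fixed feature table formats the lines.
import Mathlib
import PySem

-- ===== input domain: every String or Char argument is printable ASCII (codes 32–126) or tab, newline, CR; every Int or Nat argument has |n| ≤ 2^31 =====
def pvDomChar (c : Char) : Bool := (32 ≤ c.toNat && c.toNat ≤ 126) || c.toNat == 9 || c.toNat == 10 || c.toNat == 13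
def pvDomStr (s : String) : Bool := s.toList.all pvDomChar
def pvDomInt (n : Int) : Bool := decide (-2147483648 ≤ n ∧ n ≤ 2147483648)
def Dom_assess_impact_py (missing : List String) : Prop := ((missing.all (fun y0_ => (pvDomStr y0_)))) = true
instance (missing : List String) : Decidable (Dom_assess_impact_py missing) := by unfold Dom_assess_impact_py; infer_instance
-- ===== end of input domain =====

-- B changes the traversal: one counting pass over `missing` plus a formatting pass, instead of one filter pass per feature.

-- shared f-string: "  ❌ {feature}: {n} methods missing - FEATURE BROKEN"
def pvLine (feature : String) (n : Int) : String :=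
  "  ❌ " ++ feature ++ ": " ++ PySem.Int.toStr n ++ " methods missing - FEATURE BROKEN"

-- ===== PORT A =====
-- the dict literal impact_map, iterated in insertion order
def pvImpactMap : List (String × List String) :=
  [("Requests System", ["request"]),
   ("Laundry Scheduling", ["laundry"]),
   ("Blocked Time Slots", ["blocked"]),
   ("Shopping List", ["shopping"]),
   ("Sub-Chores", ["sub_chore"])]

def assess_impact_py (missing : List String) : String :=
  let impacts :=
    pvImpactMap.foldl
      (fun impacts fk =>
        let affected := missing.filter
          (fun m => fk.2.any (fun kw => PySem.Str.isIn kw (PySem.Str.lower m)))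
        if !affected.isEmpty then impacts ++ [pvLine fk.1 (affected.length : Int)]
        else impacts)
      []
  if !impacts.isEmpty then PySem.Str.join "\n" impacts
  else "  ℹ️ No critical features affected"

-- ===== PORT B =====
-- the feature table, one keyword per feature
def pvFeatures : List (String × String) :=
  [("Requests System", "request"),
   ("Laundry Scheduling", "laundry"),
   ("Blocked Time Slots", "blocked"),
   ("Shopping List", "shopping"),
   ("Sub-Chores", "sub_chore")]

-- counting pass: each element of `missing` increments the counter of every row whose keyword it contains
def assess_impact_py_alt (missing : List String) : String :=
  let counts :=
    missing.foldl
      (fun cs m =>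
        let ml := PySem.Str.lower m
        cs.map (fun row => if PySem.Str.isIn row.2.1 ml then (row.1, row.2.1, row.2.2 + 1) else row))
      (pvFeatures.map (fun f => (f.1, f.2, (0 : Int))))
  let lines :=
    counts.foldl
      (fun acc row => if row.2.2 ≠ 0 then acc ++ [pvLine row.1 row.2.2] else acc)
      []
  if !lines.isEmpty then PySem.Str.join "\n" lines
  else "  ℹ️ No critical features affected"

-- ===== PRECONDITION & SPEC =====
def Spec_assess_impact_py (missing : List String) (out : String) : Prop := out = assess_impact_py_alt missing
instance (missing : List String) (out : String) : Decidable (Spec_assess_impact_py missing out) := by unfold Spec_assess_impact_py; infer_instance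

-- ===== CLAIM (what is proved, stated in full; the proofs are below) =====
def Claim_equal_assess_impact_py : Prop := ∀ (missing : List String), Dom_assess_impact_py missing → Spec_assess_impact_py missing (assess_impact_py missing)

-- ===== LEMMAS AND PROOFS =====

-- the counting fold acts on each row independently
theorem pv_foldl_map (missing : List String)
    (g : String → (String × String × Int) → (String × String × Int))
    (init : List (String × String × Int)) :
    missing.foldl (fun cs m => cs.map (g m)) init
      = init.map (fun row => missing.foldl (fun r m => g m r) row) := by
  induction missing generalizing init with
  | nil => simp
  | cons m rest ih =>
      simp only [List.foldl_cons, ih, List.map_map]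
      rfl

-- one row's fold is a countP
theorem pv_row_count (missing : List String) (f kw : String) (c : Int) :
    missing.foldl
      (fun (r : String × String × Int) m =>
        if PySem.Str.isIn r.2.1 (PySem.Str.lower m) then (r.1, r.2.1, r.2.2 + 1) else r)
      (f, kw, c)
      = (f, kw, c + (missing.countP (fun m => PySem.Str.isIn kw (PySem.Str.lower m)) : Int)) := by
  induction missing generalizing c with
  | nil => simp
  | cons m rest ih =>
      simp only [List.foldl_cons, List.countP_cons]
      by_cases h : PySem.Str.isIn kw (PySem.Str.lower m) = true
      · rw [if_pos h, ih]
        simp only [h, if_true, Prod.mk.injEq, true_and]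
        push_cast
        ring
      · rw [if_neg h, ih]
        simp only [h, Prod.mk.injEq, true_and]
        push_cast
        ring

-- ===== VERDICT (by name: the statement is the Claim_ definition above) =====
theorem assess_impact_py_spec : Claim_equal_assess_impact_py := by
  intro missing _
  unfold Spec_assess_impact_py assess_impact_py assess_impact_py_alt pvImpactMap pvFeatures
  simp only [List.map_cons, List.map_nil, pv_foldl_map, pv_row_count, List.foldl_cons,
    List.foldl_nil, List.any_cons, List.any_nil, Bool.or_false, zero_add,
    List.countP_eq_length_filter, ne_eq, Int.natCast_eq_zero, List.length_eq_zero_iff,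
    Bool.not_eq_eq_eq_not, Bool.not_true, List.isEmpty_eq_false_iff]
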